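-- pv_equiv track=rewrite | github.com/XuZhang99/sglang-omni | sglang_omni/models/ming_omni/diffusion/semantic_encoder.py | _find_first_index_of_consecutive_ones
-- ===== SOURCE A (Python) =====
-- def _find_first_index_of_consecutive_ones(lst: list[int]) -> list[int]:
--     """Return the index of the first 1 in each consecutive-ones segment."""
--     result = []
--     i = 0
--     n = len(lst)
--     while i < n:
--         if lst[i] == 1:
--             result.append(i)
--             while i < n and lst[i] == 1:
--                 i += 1
--         else:
--             i += 1
--     return result
-- ===== SOURCE B (Python) =====
-- def _find_first_index_of_consecutive_ones(lst: list[int]) -> list[int]: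
--     """Return the index of the first 1 in each consecutive-ones segment."""
--     return [i for i in range(len(lst)) if lst[i] == 1 and (i == 0 or lst[i - 1] != 1)]
-- ===== Notes on version B (the rewrite author's own statement) =====
-- stated objective: idiomatic
-- what changed: Replaced the nested while-loops (outer scan plus inner run-skipping loop with manual index state) by a single flat comprehension that records every rising edge: index i is kept iff lst[i]==1 and its predecessor is not 1.
import Mathlib
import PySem

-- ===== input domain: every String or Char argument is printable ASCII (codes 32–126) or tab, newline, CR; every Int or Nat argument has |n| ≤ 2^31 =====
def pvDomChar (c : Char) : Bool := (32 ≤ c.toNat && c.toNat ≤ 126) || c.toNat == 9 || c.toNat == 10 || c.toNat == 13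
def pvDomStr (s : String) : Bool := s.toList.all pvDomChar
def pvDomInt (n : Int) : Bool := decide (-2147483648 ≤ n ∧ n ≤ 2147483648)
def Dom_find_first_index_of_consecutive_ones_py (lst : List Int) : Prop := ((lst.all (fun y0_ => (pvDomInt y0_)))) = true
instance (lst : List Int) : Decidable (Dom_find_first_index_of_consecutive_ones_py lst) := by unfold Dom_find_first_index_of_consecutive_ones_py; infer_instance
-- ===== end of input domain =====

-- B replaces A's nested while-loops by one flat comprehension keeping each rising edge (lst[i]==1 and predecessor ≠ 1); idiomatic, same O(n) cost.

-- ===== PORT A =====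
-- inner 'while i < n and lst[i] == 1: i += 1' (lst[i] is in range when read, so getD is exact)
def pyInner (lst : List Int) (n i : Nat) : Nat :=
  if h : i < n ∧ lst.getD i 0 = 1 then pyInner lst n (i + 1) else i
termination_by n - i
decreasing_by omega

theorem pyInner_ge (lst : List Int) (n i : Nat) : i ≤ pyInner lst n i := by
  fun_induction pyInner with
  | case1 i h ih => omega
  | case2 i h => exact le_refl _

-- the port needs this to terminate: the inner loop strictly advances i when entered
theorem pyInner_gt (lst : List Int) (n i : Nat) (h1 : i < n) (h2 : lst.getD i 0 = 1) :
    i < pyInner lst n i := by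
  rw [pyInner]
  simp only [h1, h2, and_self, dif_pos]
  have := pyInner_ge lst n (i + 1)
  omega

-- outer while loop of A
def pyOuter (lst : List Int) (n i : Nat) (result : List Int) : List Int :=
  if h : i < n then
    if h1 : lst.getD i 0 = 1 then
      pyOuter lst n (pyInner lst n i) (result ++ [(i : Int)])
    else
      pyOuter lst n (i + 1) result
  else result
termination_by n - i
decreasing_by
  · exact Nat.sub_lt_sub_left h (pyInner_gt lst n i h h1)
  · omega

def find_first_index_of_consecutive_ones_py (lst : List Int) : List Int :=
  pyOuter lst lst.length 0 []

-- ===== PORT B =====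
-- [i for i in range(len(lst)) if lst[i] == 1 and (i == 0 or lst[i-1] != 1)]
-- (both indices are in range when read, so getD is exact)
def find_first_index_of_consecutive_ones_py_alt (lst : List Int) : List Int :=
  ((List.range lst.length).filter
      (fun i => lst.getD i 0 == 1 && (i == 0 || lst.getD (i - 1) 0 != 1))).map
    (fun i => (i : Int))

-- ===== PRECONDITION & SPEC =====
def Spec_find_first_index_of_consecutive_ones_py (lst : List Int) (out : List Int) : Prop := out = find_first_index_of_consecutive_ones_py_alt lst
instance (lst : List Int) (out : List Int) : Decidable (Spec_find_first_index_of_consecutive_ones_py lst out) := by unfold Spec_find_first_index_of_consecutive_ones_py; infer_instance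

-- ===== CLAIM (what is proved, stated in full; the proofs are below) =====
def Claim_equal_find_first_index_of_consecutive_ones_py : Prop := ∀ (lst : List Int), Dom_find_first_index_of_consecutive_ones_py lst → Spec_find_first_index_of_consecutive_ones_py lst (find_first_index_of_consecutive_ones_py lst)

-- ===== LEMMAS AND PROOFS =====

def edgeCond (lst : List Int) (i : Nat) : Bool :=
  lst.getD i 0 == 1 && (i == 0 || lst.getD (i - 1) 0 != 1)

theorem pyInner_le (lst : List Int) (n i : Nat) (h : i ≤ n) : pyInner lst n i ≤ n := by
  fun_induction pyInner with
  | case1 i h' ih => exact ih h'.1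
  | case2 i h' => exact h

theorem pyInner_stop (lst : List Int) (n i : Nat) :
    ¬ (pyInner lst n i < n ∧ lst.getD (pyInner lst n i) 0 = 1) := by
  fun_induction pyInner with
  | case1 i h ih => exact ih
  | case2 i h => exact h

theorem pyInner_run (lst : List Int) (n i : Nat) :
    ∀ j, i ≤ j → j < pyInner lst n i → lst.getD j 0 = 1 := by
  fun_induction pyInner with
  | case1 i h ih =>
    intro j hij hj
    rcases Nat.eq_or_lt_of_le hij with rfl | hlt
    · exact h.2
    · exact ih j hlt hj
  | case2 i h =>
    intro j hij hj
    omega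

theorem outer_eq (lst : List Int) (n i : Nat) (result : List Int)
    (hyp : i = 0 ∨ n ≤ i ∨ ¬ (lst.getD i 0 = 1 ∧ lst.getD (i - 1) 0 = 1)) :
    pyOuter lst n i result =
      result ++ ((List.range' i (n - i)).filter (edgeCond lst)).map (fun j => (j : Int)) := by
  fun_induction pyOuter with
  | case1 i result h h1 ih =>
    set m := pyInner lst n i with hm
    have hgt : i < m := pyInner_gt lst n i h h1
    have hle : m ≤ n := pyInner_le lst n i (le_of_lt h)
    have hedge : edgeCond lst i = true := by
      simp only [edgeCond, Bool.and_eq_true, beq_iff_eq, Bool.or_eq_true, bne_iff_ne, ne_eq]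
      refine ⟨h1, ?_⟩
      rcases hyp with h0 | hn | hnc
      · left; simpa using h0
      · omega
      · right; intro hc; exact hnc ⟨h1, hc⟩
    have hsplit : List.range' i (n - i) = List.range' i (m - i) ++ List.range' m (n - m) := by
      have h0 : List.range' i (m - i) ++ List.range' (i + 1 * (m - i)) (n - m) =
          List.range' i ((m - i) + (n - m)) := List.range'_append
      rw [show i + 1 * (m - i) = m by omega, show (m - i) + (n - m) = n - i by omega] at h0
      exact h0.symm
    have hcons : List.range' i (m - i) = i :: List.range' (i + 1) (m - i - 1) := by
      conv_lhs => rw [show m - i = (m - i - 1) + 1 by omega]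
      rw [List.range'_succ]
    have hnil : (List.range' (i + 1) (m - i - 1)).filter (edgeCond lst) = [] := by
      rw [List.filter_eq_nil_iff]
      intro j hj
      rw [List.mem_range'_1] at hj
      have hj1 : lst.getD j 0 = 1 := pyInner_run lst n i j (by omega) (by omega)
      have hj2 : lst.getD (j - 1) 0 = 1 := pyInner_run lst n i (j - 1) (by omega) (by omega)
      have hj0 : j ≠ 0 := by omega
      simp [edgeCond, hj0]
      intro _
      simpa [List.getD_eq_getElem?_getD] using hj2
    have hyp' : m = 0 ∨ n ≤ m ∨ ¬ (lst.getD m 0 = 1 ∧ lst.getD (m - 1) 0 = 1) := by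
      by_cases hmn : m < n
      · right; right
        intro hc
        exact pyInner_stop lst n i ⟨hmn, hc.1⟩
      · right; left; omega
    rw [ih hyp', hsplit, List.filter_append, hcons, List.filter_cons_of_pos hedge, hnil]
    simp
  | case2 i result h h1 ih =>
    have hedge : edgeCond lst i = false := by
      simp only [edgeCond, Bool.and_eq_false_iff]
      left; simpa using h1
    have hyp' : i + 1 = 0 ∨ n ≤ i + 1 ∨ ¬ (lst.getD (i + 1) 0 = 1 ∧ lst.getD (i + 1 - 1) 0 = 1) := by
      right; right
      intro hc
      simp only [Nat.add_sub_cancel] at hc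
      exact h1 hc.2
    rw [ih hyp']
    have hcons : List.range' i (n - i) = i :: List.range' (i + 1) (n - (i + 1)) := by
      conv_lhs => rw [show n - i = (n - (i + 1)) + 1 by omega]
      rw [List.range'_succ]
    rw [hcons, List.filter_cons_of_neg (by simp [hedge])]
  | case3 i result h =>
    rw [show n - i = 0 by omega]
    simp

-- ===== VERDICT (by name: the statement is the Claim_ definition above) =====
theorem find_first_index_of_consecutive_ones_py_spec : Claim_equal_find_first_index_of_consecutive_ones_py := by
  intro lst _
  unfold Spec_find_first_index_of_consecutive_ones_py find_first_index_of_consecutive_ones_py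
    find_first_index_of_consecutive_ones_py_alt
  rw [outer_eq lst lst.length 0 [] (Or.inl rfl), List.range_eq_range']
  rw [show (fun i => lst.getD i 0 == 1 && (i == 0 || lst.getD (i - 1) 0 != 1)) = edgeCond lst from rfl]
  simp only [Nat.sub_zero, List.nil_append]
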